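-- pv_equiv track=rewrite | github.com/Valirek/advent-2025 | advent3.py | find_batteries_to_activate
-- ===== SOURCE A (Python) =====
-- def find_batteries_to_activate(bank: list[int], num_to_activate: int):
--     active_batteries = []
--     start_idx = 0
--     for num_remaining in range(num_to_activate, 0, -1):
--         bank_slice = bank[start_idx:(len(bank) - num_remaining + 1)]
--         battery = max(bank_slice)
--         start_idx += bank_slice.index(battery) + 1
--         active_batteries.append(battery)
--     return active_batteries
-- ===== SOURCE B (Python) =====
-- def find_batteries_to_activate(bank: list[int], num_to_activate: int):
--     # Monotonic-stack greedy: one pass; pop smaller tops while enough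
--     # elements remain to fill the quota (strict < keeps the leftmost of ties).
--     stack = []
--     remaining = len(bank)
--     for x in bank:
--         while stack and stack[-1] < x and len(stack) + remaining > num_to_activate:
--             stack.pop()
--         if len(stack) < num_to_activate:
--             stack.append(x)
--         remaining -= 1
--     return stack
-- ===== Notes on version B (the rewrite author's own statement) =====
-- stated objective: faster
-- what changed: Replaced the per-pick slice/max/index rescans (O(n*k)) by a single left-to-right monotonic-stack pass that pops smaller stack tops while enough elements remain to fill the quota (strict < keeps the leftmost of tied maxima).
import Mathlib
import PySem

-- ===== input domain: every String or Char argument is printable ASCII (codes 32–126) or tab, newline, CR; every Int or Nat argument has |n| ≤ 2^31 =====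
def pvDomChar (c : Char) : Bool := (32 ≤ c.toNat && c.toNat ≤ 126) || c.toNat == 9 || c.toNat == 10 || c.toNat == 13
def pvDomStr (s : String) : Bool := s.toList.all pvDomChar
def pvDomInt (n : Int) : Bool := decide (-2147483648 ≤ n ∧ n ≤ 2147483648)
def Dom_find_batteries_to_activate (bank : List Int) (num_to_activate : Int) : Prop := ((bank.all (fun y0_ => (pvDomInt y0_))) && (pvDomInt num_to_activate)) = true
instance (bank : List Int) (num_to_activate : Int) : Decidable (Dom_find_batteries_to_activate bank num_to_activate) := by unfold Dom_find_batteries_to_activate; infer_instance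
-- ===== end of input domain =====

-- B replaces A's per-pick slice/max/index rescans by a single monotonic-stack pass (asymptotically faster, measured); return values proved equal wherever A returns.


-- ===== PORT A =====
-- one loop iteration of A: slice, max, first index, append (the .getD 0 are only
-- reached when the slice is empty, i.e. exactly where Python's max() raises — outside Pre_)
def aStep (bank : List Int) (s : List Int × Int) (rem : Int) : List Int × Int :=
  let bank_slice := PySem.List.slice bank (some s.2) (some ((bank.length : Int) - rem + 1))
  let battery := (PySem.List.max? bank_slice (fun y => y)).getD 0
  let idx := (PySem.List.index? bank_slice battery).getD 0
  (s.1 ++ [battery], s.2 + (idx : Int) + 1)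

def find_batteries_to_activate (bank : List Int) (num_to_activate : Int) : List Int :=
  ((PySem.List.pyRange num_to_activate 0 (-1)).foldl (aStep bank) ([], 0)).1

-- ===== PORT B =====
-- B's while-pop loop; the Python stack is kept REVERSED here (head = top), reversed back at the end
def altPop (k : Int) (remaining : Int) (x : Int) : List Int → List Int
  | [] => []
  | t :: rest =>
      if t < x ∧ (rest.length : Int) + 1 + remaining > k then altPop k remaining x rest
      else t :: rest

-- one loop iteration of B: pop, conditional push, decrement remaining
def altStep (k : Int) (s : List Int × Int) (x : Int) : List Int × Int :=
  let st := altPop k s.2 x s.1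
  ((if (st.length : Int) < k then x :: st else st), s.2 - 1)

def find_batteries_to_activate_alt (bank : List Int) (num_to_activate : Int) : List Int :=
  ((bank.foldl (altStep num_to_activate) ([], (bank.length : Int))).1).reverse

-- ===== PRECONDITION & SPEC =====
-- Pre_ excludes exactly the inputs where Python A raises ValueError (max of an empty slice):
-- num_to_activate > len(bank); on every other input A returns normally.
def Pre_find_batteries_to_activate (bank : List Int) (num_to_activate : Int) : Prop :=
  num_to_activate ≤ (bank.length : Int)
instance (bank : List Int) (num_to_activate : Int) : Decidable (Pre_find_batteries_to_activate bank num_to_activate) := by unfold Pre_find_batteries_to_activate; infer_instance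

def pvWitness_find_batteries_to_activate : List Int × Int := ([3, 1, 4, 1, 5], 3)

def Spec_find_batteries_to_activate (bank : List Int) (num_to_activate : Int) (out : List Int) : Prop := out = find_batteries_to_activate_alt bank num_to_activate
instance (bank : List Int) (num_to_activate : Int) (out : List Int) : Decidable (Spec_find_batteries_to_activate bank num_to_activate out) := by unfold Spec_find_batteries_to_activate; infer_instance

-- ===== CLAIM (what is proved, stated in full; the proofs are below) =====
def Claim_equal_find_batteries_to_activate : Prop := ∀ (bank : List Int) (num_to_activate : Int), Dom_find_batteries_to_activate bank num_to_activate → Pre_find_batteries_to_activate bank num_to_activate → Spec_find_batteries_to_activate bank num_to_activate (find_batteries_to_activate bank num_to_activate)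


-- ===== LEMMAS AND PROOFS =====

-- the common greedy specification both ports are reduced to
def G (bank : List Int) : Nat → List Int
  | 0 => []
  | (kN + 1) =>
      let w := bank.take (bank.length - kN)
      let m := (PySem.List.max? w (fun y => y)).getD 0
      let i := (PySem.List.index? w m).getD 0
      m :: G (bank.drop (i + 1)) kN

theorem max?_exists (l : List Int) (h : l ≠ []) :
    ∃ m, PySem.List.max? l (fun y => y) = some m := by
  cases hmx : PySem.List.max? l (fun y => y) with
  | none => exact absurd ((PySem.List.max?_eq_none_iff _ _).mp hmx) h
  | some m => exact ⟨m, rfl⟩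

theorem index?_exists_of_mem {l : List Int} {v : Int} (h : v ∈ l) :
    ∃ i, PySem.List.index? l v = some i ∧ i < l.length := by
  have hs : (PySem.List.index? l v).isSome := (PySem.List.index?_isSome_iff _ _).mpr h
  obtain ⟨i, hi⟩ := Option.isSome_iff_exists.mp hs
  refine ⟨i, hi, ?_⟩
  obtain ⟨pre, suf, hl, hlen, -⟩ := (PySem.List.index?_eq_some_iff _ _ _).mp hi
  subst hl
  simp [← hlen]

theorem A_shift : ∀ (kN : Nat) (bank acc : List Int) (s : Nat), s + kN ≤ bank.length →
    ((PySem.List.pyRange (kN : Int) 0 (-1)).foldl (aStep bank) (acc, (s : Int))).1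
      = acc ++ ((PySem.List.pyRange (kN : Int) 0 (-1)).foldl (aStep (bank.drop s)) ([], 0)).1 := by
  intro kN
  induction kN with
  | zero =>
      intro bank acc s h
      rw [PySem.List.pyRange_neg_one_eq_nil (by norm_num)]
      simp
  | succ kN ih =>
      intro bank acc s h
      have hcons : PySem.List.pyRange ((kN + 1 : Nat) : Int) 0 (-1)
          = ((kN + 1 : Nat) : Int) :: PySem.List.pyRange ((kN : Nat) : Int) 0 (-1) := by
        have hc : ((kN + 1 : Nat) : Int) - 1 = ((kN : Nat) : Int) := by omega
        rw [PySem.List.pyRange_neg_one_cons (by positivity), hc]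
      have hb1 : (bank.length : Int) - ((kN + 1 : Nat) : Int) + 1
          = ((bank.length - kN - s + s : Nat) : Int) := by omega
      have hb2 : ((bank.drop s).length : Int) - ((kN + 1 : Nat) : Int) + 1
          = ((bank.length - kN - s : Nat) : Int) := by
        rw [List.length_drop]; omega
      have hslice1 : PySem.List.slice bank (some (s : Int))
            (some ((bank.length : Int) - ((kN + 1 : Nat) : Int) + 1))
          = (bank.drop s).take (bank.length - kN - s) := by
        rw [hb1, PySem.List.slice_natCast]
        congr 1
        omega
      have hslice2 : PySem.List.slice (bank.drop s) (some (0 : Int))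
            (some (((bank.drop s).length : Int) - ((kN + 1 : Nat) : Int) + 1))
          = (bank.drop s).take (bank.length - kN - s) := by
        rw [hb2]
        simp only [PySem.List.slice_zero_start, PySem.List.slice_to_natCast]
      set sl := (bank.drop s).take (bank.length - kN - s) with hsl
      have hlen : sl.length = bank.length - kN - s := by
        rw [hsl, List.length_take, List.length_drop]
        omega
      have hne : sl ≠ [] := by
        intro hnil
        rw [hnil] at hlen
        simp at hlen
        omega
      obtain ⟨m, hm⟩ := max?_exists sl hne
      obtain ⟨i, hi, hilt⟩ := index?_exists_of_mem (PySem.List.max?_mem hm)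
      rw [hcons]
      simp only [List.foldl_cons]
      have hstep1 : aStep bank (acc, (s : Int)) ((kN + 1 : Nat) : Int)
          = (acc ++ [m], ((s + i + 1 : Nat) : Int)) := by
        simp only [aStep, hslice1, hm, hi, Option.getD_some]
        congr 1
      have hstep2 : aStep (bank.drop s) (([] : List Int), (0 : Int)) ((kN + 1 : Nat) : Int)
          = ([m], ((i + 1 : Nat) : Int)) := by
        simp only [aStep, hslice2, hm, hi, Option.getD_some, List.nil_append]
        congr 1
        omega
      rw [hstep1, hstep2]
      rw [ih bank (acc ++ [m]) (s + i + 1) (by omega)]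
      rw [ih (bank.drop s) [m] (i + 1) (by rw [List.length_drop]; omega)]
      rw [List.drop_drop, List.append_assoc, Nat.add_assoc]

theorem A_eq_G : ∀ (kN : Nat) (bank : List Int), kN ≤ bank.length →
    find_batteries_to_activate bank (kN : Int) = G bank kN := by
  intro kN
  induction kN with
  | zero =>
      intro bank h
      unfold find_batteries_to_activate
      rw [PySem.List.pyRange_neg_one_eq_nil (by norm_num)]
      rfl
  | succ kN ih =>
      intro bank h
      unfold find_batteries_to_activate
      have hcons : PySem.List.pyRange ((kN + 1 : Nat) : Int) 0 (-1)
          = ((kN + 1 : Nat) : Int) :: PySem.List.pyRange ((kN : Nat) : Int) 0 (-1) := by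
        have hc : ((kN + 1 : Nat) : Int) - 1 = ((kN : Nat) : Int) := by omega
        rw [PySem.List.pyRange_neg_one_cons (by positivity), hc]
      have hb : (bank.length : Int) - ((kN + 1 : Nat) : Int) + 1
          = ((bank.length - kN : Nat) : Int) := by omega
      have hslice : PySem.List.slice bank (some (0 : Int))
            (some ((bank.length : Int) - ((kN + 1 : Nat) : Int) + 1))
          = bank.take (bank.length - kN) := by
        rw [hb]
        simp only [PySem.List.slice_zero_start, PySem.List.slice_to_natCast]
      set w := bank.take (bank.length - kN) with hw
      have hwlen : w.length = bank.length - kN := by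
        rw [hw, List.length_take]; omega
      have hwne : w ≠ [] := by
        intro hnil
        rw [hnil] at hwlen
        simp at hwlen
        omega
      obtain ⟨m, hm⟩ := max?_exists w hwne
      obtain ⟨i, hi, hilt⟩ := index?_exists_of_mem (PySem.List.max?_mem hm)
      rw [hcons]
      simp only [List.foldl_cons]
      have hstep : aStep bank (([] : List Int), (0 : Int)) ((kN + 1 : Nat) : Int)
          = ([m], ((i + 1 : Nat) : Int)) := by
        simp only [aStep, hslice, hm, hi, Option.getD_some, List.nil_append]
        congr 1
        omega
      rw [hstep]
      rw [A_shift kN bank [m] (i + 1) (by omega)]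
      have hrec : ((PySem.List.pyRange ((kN : Nat) : Int) 0 (-1)).foldl
            (aStep (bank.drop (i + 1))) ([], 0)).1
          = find_batteries_to_activate (bank.drop (i + 1)) ((kN : Nat) : Int) := rfl
      rw [hrec, ih (bank.drop (i + 1)) (by rw [List.length_drop]; omega)]
      simp only [G, ← hw, hm, hi, Option.getD_some]
      rfl

theorem altPop_subset (k r x : Int) : ∀ (st : List Int), ∀ y ∈ altPop k r x st, y ∈ st := by
  intro st
  induction st with
  | nil => simp [altPop]
  | cons t rest ih =>
      intro y hy
      simp only [altPop] at hy
      split at hy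
      · exact List.mem_cons_of_mem t (ih y hy)
      · exact hy

theorem altPop_all_lt (k x : Int) : ∀ (st : List Int) (r : Int), k ≤ r →
    (∀ y ∈ st, y < x) → altPop k r x st = [] := by
  intro st
  induction st with
  | nil => intro r _ _; rfl
  | cons t rest ih =>
      intro r hkr hlt
      simp only [altPop]
      rw [if_pos ⟨hlt t (List.mem_cons_self), by omega⟩]
      exact ih r hkr (fun y hy => hlt y (List.mem_cons_of_mem t hy))

theorem stack_inv (k : Int) (P : Int → Prop) : ∀ (l : List Int) (st : List Int) (r : Int),
    (∀ y ∈ st, P y) → (∀ y ∈ l, P y) → ∀ y ∈ (l.foldl (altStep k) (st, r)).1, P y := by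
  intro l
  induction l with
  | nil => intro st r hst _; exact hst
  | cons x t ih =>
      intro st r hst hl
      simp only [List.foldl_cons]
      have hst' : ∀ y ∈ (altStep k (st, r) x).1, P y := by
        intro y hy
        simp only [altStep] at hy
        split at hy
        · rcases List.mem_cons.mp hy with h | h
          · exact h ▸ hl x (List.mem_cons_self)
          · exact hst y (altPop_subset k r x st y h)
        · exact hst y (altPop_subset k r x st y hy)
      have hpair : altStep k (st, r) x = ((altStep k (st, r) x).1, (altStep k (st, r) x).2) := rfl
      rw [hpair]
      exact ih _ _ hst' (fun y hy => hl y (List.mem_cons_of_mem x hy))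

theorem altStep_snd (k : Int) (s : List Int × Int) (x : Int) : (altStep k s x).2 = s.2 - 1 := rfl

theorem foldl_altStep_snd (k : Int) : ∀ (l : List Int) (st : List Int) (r : Int),
    (l.foldl (altStep k) (st, r)).2 = r - l.length := by
  intro l
  induction l with
  | nil => intro st r; simp
  | cons x t ih =>
      intro st r
      simp only [List.foldl_cons]
      have hpair : altStep k (st, r) x = ((altStep k (st, r) x).1, r - 1) := by
        rw [← altStep_snd k (st, r) x]
      rw [hpair, ih]
      simp only [List.length_cons]
      push_cast
      omega

theorem altPop_seed (k r x m : Int) (hm : ¬(m < x ∧ 1 + r > k)) :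
    ∀ (st : List Int), altPop k r x (st ++ [m]) = altPop (k - 1) r x st ++ [m] := by
  intro st
  induction st with
  | nil =>
      simp only [List.nil_append, altPop]
      rw [if_neg (by simp only [List.length_nil]; push_cast; omega)]
  | cons t rest ih =>
      simp only [List.cons_append, altPop]
      by_cases hc : t < x ∧ ((rest.length : Int) + 1) + r > k - 1
      · rw [if_pos ⟨hc.1, by simp only [List.length_append, List.length_cons, List.length_nil]; push_cast; omega⟩,
           if_pos hc]
        exact ih
      · rw [if_neg (by simp only [List.length_append, List.length_cons, List.length_nil]; push_cast; omega),
           if_neg hc]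
        simp

theorem B_seed (k m : Int) : ∀ (l : List Int) (st : List Int),
    (∀ (j : Nat) (hj : j < l.length), k ≤ (l.length : Int) - j → l[j] ≤ m) →
    (l.foldl (altStep k) (st ++ [m], (l.length : Int))).1
      = (l.foldl (altStep (k - 1)) (st, (l.length : Int))).1 ++ [m] := by
  intro l
  induction l with
  | nil => intro st _; simp
  | cons x t ih =>
      intro st H
      simp only [List.foldl_cons]
      have hnotpop : ¬(m < x ∧ 1 + ((x :: t).length : Int) > k) := by
        rintro ⟨hmx, hr⟩
        by_cases hk : k ≤ ((x :: t).length : Int)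
        · have := H 0 (by simp) (by push_cast; omega)
          simp at this
          omega
        · simp at hr hk
          omega
      have hpop := altPop_seed k ((x :: t).length : Int) x m hnotpop st
      set r : Int := ((x :: t).length : Int) with hr
      have hsnd : r - 1 = (t.length : Int) := by
        rw [hr]; simp only [List.length_cons]; push_cast; ring
      have hpop := altPop_seed k r x m hnotpop st
      set A := altPop (k - 1) r x st with hA
      have hstep : altStep k (st ++ [m], r) x
          = ((altStep (k - 1) (st, r) x).1 ++ [m], (t.length : Int)) := by
        simp only [altStep, hpop, ← hA]
        by_cases hc : ((A.length : Int)) < k - 1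
        · rw [if_pos (by rw [List.length_append, List.length_singleton]; push_cast; omega), if_pos hc, hsnd]
          rfl
        · rw [if_neg (by rw [List.length_append, List.length_singleton]; push_cast; omega), if_neg hc, hsnd]
      have hstep2 : altStep (k - 1) (st, r) x
          = ((altStep (k - 1) (st, r) x).1, (t.length : Int)) := by
        conv_lhs => rw [show altStep (k - 1) (st, r) x
          = ((altStep (k - 1) (st, r) x).1, (altStep (k - 1) (st, r) x).2) from rfl]
        rw [altStep_snd]
        simp only
        rw [hsnd]
      rw [hstep, hstep2]
      exact ih _ (fun j hj hk => by
        have := H (j + 1) (by simpa using Nat.succ_lt_succ hj) (by push_cast at hk ⊢; omega)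
        simpa using this)

theorem A_nonpos (bank : List Int) (k : Int) (hk : k ≤ 0) :
    find_batteries_to_activate bank k = [] := by
  unfold find_batteries_to_activate
  rw [PySem.List.pyRange_neg_one_eq_nil hk]
  rfl


theorem B_empty_inv (k : Int) (hk : k ≤ 0) : ∀ (l : List Int) (r : Int),
    (l.foldl (altStep k) ([], r)).1 = [] := by
  intro l
  induction l with
  | nil => intro r; rfl
  | cons x t ih =>
      intro r
      have hstep : altStep k ([], r) x = ([], r - 1) := by
        simp [altStep, altPop]
        omega
      simp only [List.foldl_cons, hstep, ih]


theorem B_nonpos (bank : List Int) (k : Int) (hk : k ≤ 0) :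
    find_batteries_to_activate_alt bank k = [] := by
  unfold find_batteries_to_activate_alt
  rw [B_empty_inv k hk]
  rfl


theorem B_eq_G : ∀ (kN : Nat) (bank : List Int), kN ≤ bank.length →
    find_batteries_to_activate_alt bank (kN : Int) = G bank kN := by
  intro kN
  induction kN with
  | zero =>
      intro bank h
      rw [B_nonpos bank ((0 : Nat) : Int) (by simp)]
      rfl
  | succ kN ih =>
      intro bank h
      set w := bank.take (bank.length - kN) with hw
      have hwlen : w.length = bank.length - kN := by
        rw [hw, List.length_take]; omega
      have hwne : w ≠ [] := by
        intro hnil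
        rw [hnil] at hwlen
        simp at hwlen
        omega
      obtain ⟨m, hm⟩ := max?_exists w hwne
      obtain ⟨i, hi, hilt⟩ := index?_exists_of_mem (PySem.List.max?_mem hm)
      obtain ⟨pre, suf, hwd, hprelen, hprenot⟩ := (PySem.List.index?_eq_some_iff _ _ _).mp hi
      have hmax : ∀ y ∈ w, y ≤ m := fun y hy => PySem.List.max?_isMax hm y hy
      have hprelt : ∀ y ∈ pre, y < m := by
        intro y hy
        have hyw : y ∈ w := by rw [hwd]; exact List.mem_append_left _ hy
        rcases lt_or_eq_of_le (hmax y hyw) with h1 | h1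
        · exact h1
        · exact absurd (h1 ▸ hy) hprenot
      have hiw : i < bank.length - kN := by omega
      have htake : bank.take (i + 1) = pre ++ [m] := by
        have h1 : bank.take (i + 1) = w.take (i + 1) := by
          rw [hw, List.take_take]
          congr 1
          omega
        rw [h1, hwd, List.take_append,
            List.take_of_length_le (by omega : pre.length ≤ i + 1)]
        congr 1
        rw [show i + 1 - pre.length = 1 by omega]
        rfl
      set l := bank.drop (i + 1) with hl
      have hllen : l.length = bank.length - (i + 1) := by
        rw [hl, List.length_drop]
      have hsplit : bank = (pre ++ [m]) ++ l := by
        rw [hl, ← htake, List.take_append_drop]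
      unfold find_batteries_to_activate_alt
      have hfold :
          (List.foldl (altStep ((kN + 1 : Nat) : Int)) ([], (bank.length : Int)) bank).1
            = (List.foldl (altStep ((kN : Nat) : Int)) ([], (l.length : Int)) l).1 ++ [m] := by
        conv_lhs => rw [hsplit]
        rw [List.foldl_append, List.foldl_append]
        have hR0 : ((((pre ++ [m]) ++ l).length : Nat) : Int)
            = (pre.length : Int) + 1 + (l.length : Int) := by
          simp only [List.length_append, List.length_cons, List.length_nil]
          push_cast
          omega
        set R0 : Int := ((((pre ++ [m]) ++ l).length : Nat) : Int) with hR0d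
        have hst0 : ∀ y ∈ (List.foldl (altStep ((kN + 1 : Nat) : Int)) ([], R0) pre).1, y < m :=
          stack_inv _ _ pre [] R0 (by simp) hprelt
        have hsnd0 : (List.foldl (altStep ((kN + 1 : Nat) : Int)) ([], R0) pre).2
            = R0 - pre.length := by
          rw [foldl_altStep_snd]
        have hpairp : List.foldl (altStep ((kN + 1 : Nat) : Int)) ([], R0) pre
            = ((List.foldl (altStep ((kN + 1 : Nat) : Int)) ([], R0) pre).1,
               R0 - (pre.length : Int)) := by
          conv_lhs => rw [show List.foldl (altStep ((kN + 1 : Nat) : Int)) ([], R0) pre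
            = ((List.foldl (altStep ((kN + 1 : Nat) : Int)) ([], R0) pre).1,
               (List.foldl (altStep ((kN + 1 : Nat) : Int)) ([], R0) pre).2) from rfl]
          rw [hsnd0]
        rw [hpairp]
        have hstepm : altStep ((kN + 1 : Nat) : Int)
            ((List.foldl (altStep ((kN + 1 : Nat) : Int)) ([], R0) pre).1,
             R0 - (pre.length : Int)) m
            = ([m], (l.length : Int)) := by
          simp only [altStep]
          rw [altPop_all_lt ((kN + 1 : Nat) : Int) m _ (R0 - (pre.length : Int))
                (by rw [hR0]; push_cast; omega) hst0]
          rw [if_pos (by simp only [List.length_nil]; push_cast; omega)]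
          rw [hR0]
          congr 1
          omega
        simp only [List.foldl_cons, List.foldl_nil]
        rw [hstepm]
        have hseed := B_seed ((kN + 1 : Nat) : Int) m l []
          (by
            intro j hj hcond
            have hjlt : i + 1 + j < bank.length := by omega
            have hidx : i + 1 + j < bank.length - kN := by omega
            have hwlt : i + 1 + j < w.length := by omega
            have hgl : l[j] = bank[i + 1 + j]'hjlt := by
              rw [List.getElem_of_eq hl hj]
              exact List.getElem_drop
            have hgw : w[i + 1 + j]'hwlt = bank[i + 1 + j]'hjlt := by
              rw [List.getElem_of_eq hw hwlt]
              exact List.getElem_take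
            rw [hgl, ← hgw]
            exact hmax _ (List.getElem_mem hwlt))
        simp only [List.nil_append] at hseed
        rw [hseed]
        have hk1 : ((kN + 1 : Nat) : Int) - 1 = ((kN : Nat) : Int) := by push_cast; ring
        rw [hk1]
      rw [hfold, List.reverse_append]
      simp only [List.reverse_cons, List.reverse_nil, List.nil_append, List.singleton_append]
      have hrec : ((List.foldl (altStep ((kN : Nat) : Int)) ([], (l.length : Int)) l).1).reverse
          = find_batteries_to_activate_alt l ((kN : Nat) : Int) := rfl
      rw [hrec, ih l (by omega)]
      simp only [G, ← hw, hm, hi, Option.getD_some, ← hl]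

-- ===== VERDICT (by name: the statement is the Claim_ definition above) =====
theorem find_batteries_to_activate_spec : Claim_equal_find_batteries_to_activate := by
  intro bank k _ hpre
  unfold Spec_find_batteries_to_activate
  by_cases hk : k ≤ 0
  · rw [A_nonpos bank k hk, B_nonpos bank k hk]
  · have h0 : 0 ≤ k := le_of_lt (lt_of_not_ge hk)
    have hk' : k = ((k.toNat : Nat) : Int) := (Int.toNat_of_nonneg h0).symm
    have hle : k.toNat ≤ bank.length := by
      unfold Pre_find_batteries_to_activate at hpre; omega
    rw [hk', A_eq_G k.toNat bank hle, B_eq_G k.toNat bank hle]
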